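-- pv_equiv track=rewrite | github.com/henri-branken-matogen/henri_libs | custom_udfs/my_udfs.py | behaviour_account
-- ===== SOURCE A (Python) =====
-- def behaviour_account(b_01, b_06, b_12, b_18, b_24):
--     """
--     Take the behaviour features {b_01, b_06, b_12, b_18, b_24} as input and return account-level behaviour attributes.
--     :param b_01:  A 1-month behaviour feature.
--     :param b_06:  A 6-month behaviour feature.
--     :param b_12:  A 12-month behaviour feature.
--     :param b_18:  An 18-month behaviour feature.
--     :param b_24:  A 24-month behaviour feature.
--     :return:  The following flag/binary columns are returned:
--     [1] 'beh_exclusion': 1 if one of the behaviour features is equal to 'X-Exclusion'.  Else Null.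
--     [2] 'beh_missing': 1 if one of the behaviour features is equal to 'I-Missing'.  Else Null.
--     [3] 'beh_adverse': 1 if one of the behaviour features is equal to 'B-Bad'.  Else Null.
--     [4] 'beh_poor': 1 if one of [b_06, b_12, b_18, b_24] is 'B-Partial'.  Else Null.
--     [5] 'beh_excellent': 1 if one of [b_06, b_12, b_18, b_24] is 'G-Good'.  Else Null
--     [6] 'beh_good': 1 if one of [b_06, b_12, b_18, b_24] if 'G-Partial'.  Else Null.
--     [7] 'beh_paidup': 1 if one of the behaviour features is equal to 'P-Paid-up'.  Else Null.
--     [extra] Also, the string column `beh_account` is returned.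
--     `beh_account` can be one of the following:
--     (1) 'X. Exclusions': if 'beh_exclusion' = 1.
--     (2) 'D. Missing Record': if 'beh_missing' = 1.
--     (3) 'F. Adverse Account': if 'beh_adverse' = 1.  (Involuntary Churn).
--     (4) 'E. Poor Account': if 'beh_poor' = 1.
--     (5) 'A. Excellent Account': if 'beh_excellent' = 1.
--     (6) 'B. Good Account': if 'beh_good' = 1.
--     (7) 'C. Paid-up Account': if 'beh_paidup' = 1.  (Voluntary Churn).
--     """
--     beh_exclusion = None
--     beh_missing = None
--     beh_adverse = None
--     beh_poor = None
--     beh_excellent = None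
--     beh_good = None
--     beh_paidup = None
--
--     def eval_b_xx_vars(behaviour_feature, *b_args):
--         behaviour_feature = str(behaviour_feature).lower().strip()
--         b_args = [str(b_arg).lower().strip() for b_arg in list(b_args)]
--         for b_arg in b_args:
--             if b_arg == behaviour_feature:
--                 return True
--         else:
--             return False
--
--     # DO NOT CHANGE THE FOLLOWING SELECTION SEQUENCE.
--     if eval_b_xx_vars("X-Exclusion", b_01, b_06, b_12, b_18, b_24):
--         beh_account = "X. Exclusions"
--         beh_exclusion = 1
--     elif eval_b_xx_vars("I-Missing", b_01, b_06, b_12, b_18, b_24):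
--         beh_account = "D. Missing Record"
--         beh_missing = 1
--     elif eval_b_xx_vars("B-Bad", b_01, b_06, b_12, b_18, b_24):
--         beh_account = "F. Adverse Account"
--         beh_adverse = 1
--     elif eval_b_xx_vars("B-Partial", b_06, b_12, b_18, b_24):
--         beh_account = "E. Poor Account"
--         beh_poor = 1
--     elif eval_b_xx_vars("G-Good", b_06, b_12, b_18, b_24):
--         beh_account = "A. Excellent Account"
--         beh_excellent = 1
--     elif eval_b_xx_vars("G-Partial", b_06, b_12, b_18, b_24):
--         beh_account = "B. Good Account"
--         beh_good = 1
--     elif eval_b_xx_vars("P-Paid-up", b_01, b_06, b_12, b_18, b_24):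
--         beh_account = "C. Paid-up Account"
--         beh_paidup = 1
--     else:
--         beh_account = None
--
--     return beh_exclusion, beh_missing, beh_adverse, beh_poor, beh_excellent, beh_good, beh_paidup, beh_account
-- ===== SOURCE B (Python) =====
-- def behaviour_account(b_01, b_06, b_12, b_18, b_24):
--     # Priority-minimization rewrite: each feature value maps to a priority via a
--     # dict; one pass over the arguments keeps the smallest eligible priority,
--     # which then indexes the flag slot and the label.
--     PRIO = {"x-exclusion": 0, "i-missing": 1, "b-bad": 2, "b-partial": 3,
--             "g-good": 4, "g-partial": 5, "p-paid-up": 6}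
--     LABELS = ["X. Exclusions", "D. Missing Record", "F. Adverse Account",
--               "E. Poor Account", "A. Excellent Account", "B. Good Account",
--               "C. Paid-up Account"]
--     best = None
--     for i, x in enumerate((b_01, b_06, b_12, b_18, b_24)):
--         p = PRIO.get(str(x).lower().strip())
--         if p is None or (i == 0 and p in (3, 4, 5)):
--             continue
--         if best is None or p < best:
--             best = p
--     if best is None:
--         return (None, None, None, None, None, None, None, None)
--     flags = tuple(1 if j == best else None for j in range(7))
--     return flags + (LABELS[best],)
-- ===== Notes on version B (the rewrite author's own statement) =====
-- stated objective: alternative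
-- what changed: Replaces the seven-branch if/elif cascade of ordered membership tests over the arguments with a single argument-major pass that maps each normalized value to a numeric priority via a dict and keeps the minimum eligible priority, which then indexes the flag slot and label.
import Mathlib
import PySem

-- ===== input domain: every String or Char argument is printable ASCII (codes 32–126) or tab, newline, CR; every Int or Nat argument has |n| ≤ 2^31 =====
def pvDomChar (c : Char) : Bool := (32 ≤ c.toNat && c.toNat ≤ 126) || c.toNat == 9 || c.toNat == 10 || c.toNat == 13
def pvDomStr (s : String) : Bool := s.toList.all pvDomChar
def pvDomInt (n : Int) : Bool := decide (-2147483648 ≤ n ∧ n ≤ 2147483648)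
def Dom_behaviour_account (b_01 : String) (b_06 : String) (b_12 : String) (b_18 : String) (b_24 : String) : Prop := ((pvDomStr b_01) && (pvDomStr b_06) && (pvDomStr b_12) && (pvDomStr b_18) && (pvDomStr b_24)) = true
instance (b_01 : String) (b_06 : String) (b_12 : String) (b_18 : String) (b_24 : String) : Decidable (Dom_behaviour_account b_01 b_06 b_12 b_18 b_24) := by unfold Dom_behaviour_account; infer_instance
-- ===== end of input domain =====

-- B replaces A's if/elif cascade of ordered membership tests with one argument-major pass:
-- a dict maps each normalized value to a numeric priority, the loop keeps the minimum eligible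
-- priority, and that priority indexes the flag slot and label (objective: alternative).


-- ===== PORT A =====
-- eval_b_xx_vars: normalize the target and each argument, return True on first equal argument
def evalBXX (behaviour_feature : String) (b_args : List String) : Bool :=
  let t := PySem.Str.strip (PySem.Str.lower behaviour_feature)
  let args := b_args.map (fun b => PySem.Str.strip (PySem.Str.lower b))
  args.any (fun b => b == t)

def behaviour_account (b_01 : String) (b_06 : String) (b_12 : String) (b_18 : String) (b_24 : String) : Option Int × Option Int × Option Int × Option Int × Option Int × Option Int × Option Int × Option String :=
  if evalBXX "X-Exclusion" [b_01, b_06, b_12, b_18, b_24] then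
    (some 1, none, none, none, none, none, none, some "X. Exclusions")
  else if evalBXX "I-Missing" [b_01, b_06, b_12, b_18, b_24] then
    (none, some 1, none, none, none, none, none, some "D. Missing Record")
  else if evalBXX "B-Bad" [b_01, b_06, b_12, b_18, b_24] then
    (none, none, some 1, none, none, none, none, some "F. Adverse Account")
  else if evalBXX "B-Partial" [b_06, b_12, b_18, b_24] then
    (none, none, none, some 1, none, none, none, some "E. Poor Account")
  else if evalBXX "G-Good" [b_06, b_12, b_18, b_24] then
    (none, none, none, none, some 1, none, none, some "A. Excellent Account")
  else if evalBXX "G-Partial" [b_06, b_12, b_18, b_24] then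
    (none, none, none, none, none, some 1, none, some "B. Good Account")
  else if evalBXX "P-Paid-up" [b_01, b_06, b_12, b_18, b_24] then
    (none, none, none, none, none, none, some 1, some "C. Paid-up Account")
  else
    (none, none, none, none, none, none, none, none)

-- ===== PORT B =====
-- PRIO: normalized value -> numeric priority
def pvPRIO : PySem.Dict String Nat :=
  PySem.Dict.ofList [("x-exclusion", 0), ("i-missing", 1), ("b-bad", 2), ("b-partial", 3),
                     ("g-good", 4), ("g-partial", 5), ("p-paid-up", 6)]

def pvLABELS : List String :=
  ["X. Exclusions", "D. Missing Record", "F. Adverse Account", "E. Poor Account",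
   "A. Excellent Account", "B. Good Account", "C. Paid-up Account"]

-- one loop iteration: update `best` from argument i's priority `p`; b_01 (i = 0) is
-- ineligible for priorities 3, 4, 5
def baStep (best : Option Nat) (i : Nat) (p : Option Nat) : Option Nat :=
  match p with
  | none => best
  | some p =>
    if i == 0 && (p == 3 || p == 4 || p == 5) then best
    else match best with
      | none => some p
      | some b => if p < b then some p else some b

-- the for-loop over enumerate((b_01, b_06, b_12, b_18, b_24))
def baBest : Option Nat → List (Nat × String) → Option Nat
  | best, [] => best
  | best, (i, x) :: rest =>
      baBest (baStep best i (PySem.Dict.get? pvPRIO (PySem.Str.strip (PySem.Str.lower x)))) rest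

-- build the result tuple from the winning priority (flags by comparison, label by indexing)
def baOut (best : Option Nat) : Option Int × Option Int × Option Int × Option Int × Option Int × Option Int × Option Int × Option String :=
  match best with
  | none => (none, none, none, none, none, none, none, none)
  | some k =>
    ((if k == 0 then some 1 else none), (if k == 1 then some 1 else none),
     (if k == 2 then some 1 else none), (if k == 3 then some 1 else none),
     (if k == 4 then some 1 else none), (if k == 5 then some 1 else none),
     (if k == 6 then some 1 else none), PySem.List.pyGet? pvLABELS (k : Int))

def behaviour_account_alt (b_01 : String) (b_06 : String) (b_12 : String) (b_18 : String) (b_24 : String) : Option Int × Option Int × Option Int × Option Int × Option Int × Option Int × Option Int × Option String :=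
  baOut (baBest none [(0, b_01), (1, b_06), (2, b_12), (3, b_18), (4, b_24)])

-- ===== PRECONDITION & SPEC =====
-- explicit DecidableEq term for the 8-tuple (instance search exceeds its default size limit)
def pvDecEqTuple : DecidableEq (Option Int × Option Int × Option Int × Option Int × Option Int × Option Int × Option Int × Option String) :=
  @instDecidableEqProd _ _ _ (@instDecidableEqProd _ _ _ (@instDecidableEqProd _ _ _
    (@instDecidableEqProd _ _ _ (@instDecidableEqProd _ _ _ (@instDecidableEqProd _ _ _
      inferInstance)))))

def Spec_behaviour_account (b_01 : String) (b_06 : String) (b_12 : String) (b_18 : String) (b_24 : String) (out : Option Int × Option Int × Option Int × Option Int × Option Int × Option Int × Option Int × Option String) : Prop := out = behaviour_account_alt b_01 b_06 b_12 b_18 b_24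
instance (b_01 : String) (b_06 : String) (b_12 : String) (b_18 : String) (b_24 : String) (out : Option Int × Option Int × Option Int × Option Int × Option Int × Option Int × Option Int × Option String) : Decidable (Spec_behaviour_account b_01 b_06 b_12 b_18 b_24 out) := by unfold Spec_behaviour_account; exact pvDecEqTuple out _

-- ===== CLAIM (what is proved, stated in full; the proofs are below) =====
def Claim_equal_behaviour_account : Prop := ∀ (b_01 : String) (b_06 : String) (b_12 : String) (b_18 : String) (b_24 : String), Dom_behaviour_account b_01 b_06 b_12 b_18 b_24 → Spec_behaviour_account b_01 b_06 b_12 b_18 b_24 (behaviour_account b_01 b_06 b_12 b_18 b_24)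

-- ===== LEMMAS AND PROOFS =====

-- A's cascade abstracted over the five priority lookups
def aBest (p0 p1 p2 p3 p4 : Option Nat) : Option Nat :=
  if p0 == some 0 || (p1 == some 0 || (p2 == some 0 || (p3 == some 0 || p4 == some 0))) then some 0
  else if p0 == some 1 || (p1 == some 1 || (p2 == some 1 || (p3 == some 1 || p4 == some 1))) then some 1
  else if p0 == some 2 || (p1 == some 2 || (p2 == some 2 || (p3 == some 2 || p4 == some 2))) then some 2
  else if p1 == some 3 || (p2 == some 3 || (p3 == some 3 || p4 == some 3)) then some 3
  else if p1 == some 4 || (p2 == some 4 || (p3 == some 4 || p4 == some 4)) then some 4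
  else if p1 == some 5 || (p2 == some 5 || (p3 == some 5 || p4 == some 5)) then some 5
  else if p0 == some 6 || (p1 == some 6 || (p2 == some 6 || (p3 == some 6 || p4 == some 6))) then some 6
  else none

-- A's if/elif chain of tuples is baOut of aBest
theorem pv_a_abs (p0 p1 p2 p3 p4 : Option Nat) :
    (if p0 == some 0 || (p1 == some 0 || (p2 == some 0 || (p3 == some 0 || p4 == some 0))) then
      ((some 1 : Option Int), (none : Option Int), (none : Option Int), (none : Option Int),
       (none : Option Int), (none : Option Int), (none : Option Int), (some "X. Exclusions" : Option String))
    else if p0 == some 1 || (p1 == some 1 || (p2 == some 1 || (p3 == some 1 || p4 == some 1))) then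
      (none, some 1, none, none, none, none, none, some "D. Missing Record")
    else if p0 == some 2 || (p1 == some 2 || (p2 == some 2 || (p3 == some 2 || p4 == some 2))) then
      (none, none, some 1, none, none, none, none, some "F. Adverse Account")
    else if p1 == some 3 || (p2 == some 3 || (p3 == some 3 || p4 == some 3)) then
      (none, none, none, some 1, none, none, none, some "E. Poor Account")
    else if p1 == some 4 || (p2 == some 4 || (p3 == some 4 || p4 == some 4)) then
      (none, none, none, none, some 1, none, none, some "A. Excellent Account")
    else if p1 == some 5 || (p2 == some 5 || (p3 == some 5 || p4 == some 5)) then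
      (none, none, none, none, none, some 1, none, some "B. Good Account")
    else if p0 == some 6 || (p1 == some 6 || (p2 == some 6 || (p3 == some 6 || p4 == some 6))) then
      (none, none, none, none, none, none, some 1, some "C. Paid-up Account")
    else (none, none, none, none, none, none, none, none))
    = baOut (aBest p0 p1 p2 p3 p4) := by
  unfold aBest
  split_ifs <;> rfl

-- the 8^5-case core: A's cascade minimum equals B's loop minimum
theorem pv_core (o0 o1 o2 o3 o4 : Option (Fin 7)) :
    aBest (o0.map Fin.val) (o1.map Fin.val) (o2.map Fin.val) (o3.map Fin.val) (o4.map Fin.val)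
      = baStep (baStep (baStep (baStep (baStep none 0 (o0.map Fin.val)) 1 (o1.map Fin.val))
          2 (o2.map Fin.val)) 3 (o3.map Fin.val)) 4 (o4.map Fin.val) := by
  revert o0 o1 o2 o3 o4; decide

-- pvPRIO as a literal Dict.mk (ofList inserts pairwise-distinct keys in order)
theorem pvPRIO_mk : pvPRIO = PySem.Dict.mk
    [("x-exclusion", 0), ("i-missing", 1), ("b-bad", 2), ("b-partial", 3),
     ("g-good", 4), ("g-partial", 5), ("p-paid-up", 6)] := by decide

-- every priority lookup yields none or some k with k < 7
theorem pv_code_opt (s : String) :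
    ∃ o : Option (Fin 7), PySem.Dict.get? pvPRIO s = o.map Fin.val := by
  rw [pvPRIO_mk]
  simp only [PySem.Dict.get?_mk_cons]
  split_ifs
  · exact ⟨some 0, rfl⟩
  · exact ⟨some 1, rfl⟩
  · exact ⟨some 2, rfl⟩
  · exact ⟨some 3, rfl⟩
  · exact ⟨some 4, rfl⟩
  · exact ⟨some 5, rfl⟩
  · exact ⟨some 6, rfl⟩
  · exact ⟨none, rfl⟩

-- equality of a string with target k is equality of its priority lookup with some k
theorem pv_beq_code_0 (v : String) : (v == "x-exclusion") = (PySem.Dict.get? pvPRIO v == some 0) := by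
  rw [pvPRIO_mk]
  simp only [PySem.Dict.get?_mk_cons]
  split_ifs with h1 h2 h3 h4 h5 h6 h7
  · obtain rfl := beq_iff_eq.mp h1; decide
  · obtain rfl := beq_iff_eq.mp h2; decide
  · obtain rfl := beq_iff_eq.mp h3; decide
  · obtain rfl := beq_iff_eq.mp h4; decide
  · obtain rfl := beq_iff_eq.mp h5; decide
  · obtain rfl := beq_iff_eq.mp h6; decide
  · obtain rfl := beq_iff_eq.mp h7; decide
  · rw [show (PySem.Dict.mk ([] : List (String × Nat))).get? v = none from rfl]
    have hv : v ≠ "x-exclusion" := fun h => h1 (by simp [h])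
    simp [hv]
theorem pv_beq_code_1 (v : String) : (v == "i-missing") = (PySem.Dict.get? pvPRIO v == some 1) := by
  rw [pvPRIO_mk]
  simp only [PySem.Dict.get?_mk_cons]
  split_ifs with h1 h2 h3 h4 h5 h6 h7
  · obtain rfl := beq_iff_eq.mp h1; decide
  · obtain rfl := beq_iff_eq.mp h2; decide
  · obtain rfl := beq_iff_eq.mp h3; decide
  · obtain rfl := beq_iff_eq.mp h4; decide
  · obtain rfl := beq_iff_eq.mp h5; decide
  · obtain rfl := beq_iff_eq.mp h6; decide
  · obtain rfl := beq_iff_eq.mp h7; decide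
  · rw [show (PySem.Dict.mk ([] : List (String × Nat))).get? v = none from rfl]
    have hv : v ≠ "i-missing" := fun h => h2 (by simp [h])
    simp [hv]
theorem pv_beq_code_2 (v : String) : (v == "b-bad") = (PySem.Dict.get? pvPRIO v == some 2) := by
  rw [pvPRIO_mk]
  simp only [PySem.Dict.get?_mk_cons]
  split_ifs with h1 h2 h3 h4 h5 h6 h7
  · obtain rfl := beq_iff_eq.mp h1; decide
  · obtain rfl := beq_iff_eq.mp h2; decide
  · obtain rfl := beq_iff_eq.mp h3; decide
  · obtain rfl := beq_iff_eq.mp h4; decide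
  · obtain rfl := beq_iff_eq.mp h5; decide
  · obtain rfl := beq_iff_eq.mp h6; decide
  · obtain rfl := beq_iff_eq.mp h7; decide
  · rw [show (PySem.Dict.mk ([] : List (String × Nat))).get? v = none from rfl]
    have hv : v ≠ "b-bad" := fun h => h3 (by simp [h])
    simp [hv]
theorem pv_beq_code_3 (v : String) : (v == "b-partial") = (PySem.Dict.get? pvPRIO v == some 3) := by
  rw [pvPRIO_mk]
  simp only [PySem.Dict.get?_mk_cons]
  split_ifs with h1 h2 h3 h4 h5 h6 h7
  · obtain rfl := beq_iff_eq.mp h1; decide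
  · obtain rfl := beq_iff_eq.mp h2; decide
  · obtain rfl := beq_iff_eq.mp h3; decide
  · obtain rfl := beq_iff_eq.mp h4; decide
  · obtain rfl := beq_iff_eq.mp h5; decide
  · obtain rfl := beq_iff_eq.mp h6; decide
  · obtain rfl := beq_iff_eq.mp h7; decide
  · rw [show (PySem.Dict.mk ([] : List (String × Nat))).get? v = none from rfl]
    have hv : v ≠ "b-partial" := fun h => h4 (by simp [h])
    simp [hv]
theorem pv_beq_code_4 (v : String) : (v == "g-good") = (PySem.Dict.get? pvPRIO v == some 4) := by
  rw [pvPRIO_mk]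
  simp only [PySem.Dict.get?_mk_cons]
  split_ifs with h1 h2 h3 h4 h5 h6 h7
  · obtain rfl := beq_iff_eq.mp h1; decide
  · obtain rfl := beq_iff_eq.mp h2; decide
  · obtain rfl := beq_iff_eq.mp h3; decide
  · obtain rfl := beq_iff_eq.mp h4; decide
  · obtain rfl := beq_iff_eq.mp h5; decide
  · obtain rfl := beq_iff_eq.mp h6; decide
  · obtain rfl := beq_iff_eq.mp h7; decide
  · rw [show (PySem.Dict.mk ([] : List (String × Nat))).get? v = none from rfl]
    have hv : v ≠ "g-good" := fun h => h5 (by simp [h])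
    simp [hv]
theorem pv_beq_code_5 (v : String) : (v == "g-partial") = (PySem.Dict.get? pvPRIO v == some 5) := by
  rw [pvPRIO_mk]
  simp only [PySem.Dict.get?_mk_cons]
  split_ifs with h1 h2 h3 h4 h5 h6 h7
  · obtain rfl := beq_iff_eq.mp h1; decide
  · obtain rfl := beq_iff_eq.mp h2; decide
  · obtain rfl := beq_iff_eq.mp h3; decide
  · obtain rfl := beq_iff_eq.mp h4; decide
  · obtain rfl := beq_iff_eq.mp h5; decide
  · obtain rfl := beq_iff_eq.mp h6; decide
  · obtain rfl := beq_iff_eq.mp h7; decide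
  · rw [show (PySem.Dict.mk ([] : List (String × Nat))).get? v = none from rfl]
    have hv : v ≠ "g-partial" := fun h => h6 (by simp [h])
    simp [hv]
theorem pv_beq_code_6 (v : String) : (v == "p-paid-up") = (PySem.Dict.get? pvPRIO v == some 6) := by
  rw [pvPRIO_mk]
  simp only [PySem.Dict.get?_mk_cons]
  split_ifs with h1 h2 h3 h4 h5 h6 h7
  · obtain rfl := beq_iff_eq.mp h1; decide
  · obtain rfl := beq_iff_eq.mp h2; decide
  · obtain rfl := beq_iff_eq.mp h3; decide
  · obtain rfl := beq_iff_eq.mp h4; decide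
  · obtain rfl := beq_iff_eq.mp h5; decide
  · obtain rfl := beq_iff_eq.mp h6; decide
  · obtain rfl := beq_iff_eq.mp h7; decide
  · rw [show (PySem.Dict.mk ([] : List (String × Nat))).get? v = none from rfl]
    have hv : v ≠ "p-paid-up" := fun h => h7 (by simp [h])
    simp [hv]

-- ===== VERDICT (by name: the statement is the Claim_ definition above) =====
set_option maxHeartbeats 4000000 in
theorem behaviour_account_spec : Claim_equal_behaviour_account := by
  intro b_01 b_06 b_12 b_18 b_24 _
  unfold Spec_behaviour_account behaviour_account behaviour_account_alt evalBXX
  have hx : PySem.Str.strip (PySem.Str.lower "X-Exclusion") = "x-exclusion" := by decide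
  have hi : PySem.Str.strip (PySem.Str.lower "I-Missing") = "i-missing" := by decide
  have hb : PySem.Str.strip (PySem.Str.lower "B-Bad") = "b-bad" := by decide
  have hp : PySem.Str.strip (PySem.Str.lower "B-Partial") = "b-partial" := by decide
  have hg : PySem.Str.strip (PySem.Str.lower "G-Good") = "g-good" := by decide
  have hgp : PySem.Str.strip (PySem.Str.lower "G-Partial") = "g-partial" := by decide
  have hpu : PySem.Str.strip (PySem.Str.lower "P-Paid-up") = "p-paid-up" := by decide
  obtain ⟨o0, h0⟩ := pv_code_opt (PySem.Str.strip (PySem.Str.lower b_01))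
  obtain ⟨o1, h1⟩ := pv_code_opt (PySem.Str.strip (PySem.Str.lower b_06))
  obtain ⟨o2, h2⟩ := pv_code_opt (PySem.Str.strip (PySem.Str.lower b_12))
  obtain ⟨o3, h3⟩ := pv_code_opt (PySem.Str.strip (PySem.Str.lower b_18))
  obtain ⟨o4, h4⟩ := pv_code_opt (PySem.Str.strip (PySem.Str.lower b_24))
  simp only [baBest, List.map_cons, List.map_nil, List.any_cons, List.any_nil, Bool.or_false,
    hx, hi, hb, hp, hg, hgp, hpu,
    pv_beq_code_0, pv_beq_code_1, pv_beq_code_2, pv_beq_code_3, pv_beq_code_4, pv_beq_code_5,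
    pv_beq_code_6, h0, h1, h2, h3, h4]
  rw [pv_a_abs]
  exact congrArg baOut (pv_core o0 o1 o2 o3 o4)
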